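-- pv_equiv track=rewrite | github.com/Rajvardhan-Desai/sea-you-again | data-preprocessing-pipeline/loader.py | _infer_dims
-- ===== SOURCE A (Python) =====
-- from collections import defaultdict
--
-- def _infer_dims(shape: tuple, coords: dict) -> tuple:
--     """
--     Guess dimension names from array shape by matching coordinate lengths.
--     Uses a length-bucket approach to avoid collision when lat and lon share
--     the same size (common in square regional grids).
--     """
--     len_to_names: dict = defaultdict(list)
--     for name, v in coords.items():
--         len_to_names[len(v)].append(name)
--     len_usage: dict = defaultdict(int)
--     dims = []
--     for s in shape:
--         bucket = len_to_names.get(s)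
--         if bucket:
--             idx = len_usage[s]
--             dims.append(bucket[idx] if idx < len(bucket) else f"dim_{s}")
--             len_usage[s] += 1
--         else:
--             dims.append(f"dim_{s}")
--     return tuple(dims)
-- ===== SOURCE B (Python) =====
-- def _infer_dims(shape: tuple, coords: dict) -> tuple:
--     """
--     Guess dimension names from array shape by matching coordinate lengths.
--     For each size, take the first not-yet-used coordinate whose values have
--     that length; fall back to a synthetic "dim_<size>" name.
--     """
--     used = set()
--     dims = []
--     for s in shape:
--         for name, v in coords.items():
--             if len(v) == s and name not in used:
--                 used.add(name)
--                 dims.append(name)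
--                 break
--         else:
--             dims.append(f"dim_{s}")
--     return tuple(dims)
-- ===== Notes on version B (the rewrite author's own statement) =====
-- stated objective: simpler
-- what changed: Replaced A's precomputed length-bucket table plus per-length usage counters by a single used-set: for each size, scan coords in insertion order for the first unused coordinate of that length, falling back to the same dim_<s> name.
import Mathlib
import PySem

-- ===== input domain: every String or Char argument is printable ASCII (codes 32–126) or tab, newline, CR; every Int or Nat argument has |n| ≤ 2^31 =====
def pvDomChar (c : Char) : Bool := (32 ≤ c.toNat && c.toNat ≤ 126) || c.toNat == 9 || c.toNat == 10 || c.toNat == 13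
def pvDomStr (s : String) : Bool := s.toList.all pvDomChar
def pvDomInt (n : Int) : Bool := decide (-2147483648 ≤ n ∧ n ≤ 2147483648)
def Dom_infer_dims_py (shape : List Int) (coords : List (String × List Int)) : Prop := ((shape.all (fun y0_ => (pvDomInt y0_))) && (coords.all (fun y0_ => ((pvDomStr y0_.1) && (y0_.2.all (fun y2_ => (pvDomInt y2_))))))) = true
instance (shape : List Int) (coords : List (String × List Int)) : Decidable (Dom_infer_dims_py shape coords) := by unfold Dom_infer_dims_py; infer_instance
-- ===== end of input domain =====

-- B replaces A's length-bucket table + usage counters by a single used-set with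
-- an in-order scan of coords per size (objective: simpler).

-- ===== PORT A =====
-- step of the second loop of A: state = (len_usage, dims)
def inferStepA (lenToNames : PySem.Dict Int (List String))
    (st : PySem.Dict Int Int × List String) (s : Int) :
    PySem.Dict Int Int × List String :=
  let bucket := (lenToNames.get? s).getD []        -- bucket = len_to_names.get(s); `if bucket:` is `bucket ≠ []`
  if bucket ≠ [] then
    let idx := st.1.getD s 0
    (st.1.insert s (idx + 1),
      st.2 ++ [if idx < (bucket.length : Int) then bucket.getD idx.toNat "" else "dim_" ++ PySem.Int.toStr s])
  else
    (st.1, st.2 ++ ["dim_" ++ PySem.Int.toStr s])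

def infer_dims_py (shape : List Int) (coords : List (String × List Int)) : List String :=
  let lenToNames : PySem.Dict Int (List String) :=
    coords.foldl (fun d p => d.modify ((p.2.length : Int)) [] (fun l => l ++ [p.1])) PySem.Dict.empty
  (shape.foldl (inferStepA lenToNames) (PySem.Dict.empty, [])).2

-- ===== PORT B =====
-- first coordinate name whose value list has length s and that is not yet used
def findUnused (coords : List (String × List Int)) (s : Int) (used : PySem.Set String) : Option String :=
  (coords.find? (fun p => ((p.2.length : Int) == s) && !(PySem.Set.contains used p.1))).map Prod.fst

def inferStepB (coords : List (String × List Int))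
    (st : PySem.Set String × List String) (s : Int) :
    PySem.Set String × List String :=
  match findUnused coords s st.1 with
  | some n => (PySem.Set.add st.1 n, st.2 ++ [n])
  | none => (st.1, st.2 ++ ["dim_" ++ PySem.Int.toStr s])

def infer_dims_py_alt (shape : List Int) (coords : List (String × List Int)) : List String :=
  (shape.foldl (inferStepB coords) (PySem.Set.empty, [])).2

-- ===== PRECONDITION & SPEC =====
-- Pre_ excludes association lists with duplicate coordinate names: A's parameter
-- `coords` is a Python dict, which cannot hold a duplicate key, so such lists
-- represent no input of A.
def Pre_infer_dims_py (shape : List Int) (coords : List (String × List Int)) : Prop :=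
  (coords.map Prod.fst).Nodup
instance (shape : List Int) (coords : List (String × List Int)) : Decidable (Pre_infer_dims_py shape coords) := by unfold Pre_infer_dims_py; infer_instance

def pvWitness_infer_dims_py : List Int × (List (String × List Int)) :=
  ([3, 3, 5], [("lat", [1, 2, 3]), ("lon", [4, 5, 6]), ("t", [0, 0])])

def Spec_infer_dims_py (shape : List Int) (coords : List (String × List Int)) (out : List String) : Prop := out = infer_dims_py_alt shape coords
instance (shape : List Int) (coords : List (String × List Int)) (out : List String) : Decidable (Spec_infer_dims_py shape coords out) := by unfold Spec_infer_dims_py; infer_instance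

-- ===== CLAIM (what is proved, stated in full; the proofs are below) =====
def Claim_equal_infer_dims_py : Prop := ∀ (shape : List Int) (coords : List (String × List Int)), Dom_infer_dims_py shape coords → Pre_infer_dims_py shape coords → Spec_infer_dims_py shape coords (infer_dims_py shape coords)

-- ===== LEMMAS AND PROOFS =====

-- the names of the coordinates whose value list has length t, in order
def cand (coords : List (String × List Int)) (t : Int) : List String :=
  (coords.filter (fun p => ((p.2.length : Int) == t))).map Prod.fst

-- A's bucket of length t IS cand coords t
lemma bucket_eq (coords : List (String × List Int)) (t : Int) :
    ((coords.foldl (fun d p => d.modify ((p.2.length : Int)) [] (fun l => l ++ [p.1]))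
        PySem.Dict.empty).get? t).getD [] = cand coords t := by
  rw [← PySem.Dict.getD_eq_get?_getD]
  have hfold : coords.foldl (fun d p => d.modify ((p.2.length : Int)) [] (fun l => l ++ [p.1])) PySem.Dict.empty
      = (coords.map (fun p => ((p.2.length : Int), p.1))).foldl (fun d q => d.modify q.1 [] (fun l => l ++ [q.2])) PySem.Dict.empty := by
    rw [List.foldl_map]
  rw [hfold, PySem.Dict.getD_foldl_modify_append]
  simp [cand, PySem.Dict.getD_empty, List.filter_map, Function.comp_def]

lemma cand_nodup (coords : List (String × List Int))
    (hnd : (coords.map Prod.fst).Nodup) (t : Int) : (cand coords t).Nodup := by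
  have hsub : (cand coords t).Sublist (coords.map Prod.fst) :=
    List.Sublist.map Prod.fst List.filter_sublist
  exact hnd.sublist hsub

lemma cand_disjoint (coords : List (String × List Int))
    (hnd : (coords.map Prod.fst).Nodup) {x : String} {s t : Int}
    (hs : x ∈ cand coords s) (ht : x ∈ cand coords t) : s = t := by
  simp only [cand, List.mem_map, List.mem_filter] at hs ht
  obtain ⟨p, ⟨hp, hps⟩, hpx⟩ := hs
  obtain ⟨q, ⟨hq, hqt⟩, hqx⟩ := ht
  have hpq : p = q := List.inj_on_of_nodup_map hnd hp hq (hpx.trans hqx.symm)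
  subst hpq
  simp only [beq_iff_eq] at hps hqt
  omega

-- generic list facts about "filter p = take k"
lemma find?_not_of_filter_take {α : Type} [DecidableEq α] (l : List α) (p : α → Bool) (k : Nat)
    (hnd : l.Nodup) (h : l.filter p = l.take k) :
    l.find? (fun x => !p x) = l[k]? := by
  induction l generalizing k with
  | nil => simp
  | cons a tl ih =>
    by_cases hpa : p a
    · cases k with
      | zero => simp [hpa] at h
      | succ k' =>
        rw [List.filter_cons_of_pos hpa] at h
        simp only [List.take_succ_cons] at h
        have htl := ih k' (List.Nodup.of_cons hnd) (List.cons.inj h).2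
        simp [hpa, htl]
    · rw [List.filter_cons_of_neg (by simpa using hpa)] at h
      cases k with
      | zero =>
        simp only [List.take_zero] at h
        simp [hpa]
      | succ k' =>
        exfalso
        simp only [List.take_succ_cons] at h
        have ha : a ∈ tl := List.mem_of_mem_filter (h ▸ List.mem_cons_self)
        exact (List.nodup_cons.mp hnd).1 ha

lemma filter_or_take_succ {α : Type} [DecidableEq α] (l : List α) (p : α → Bool) (k : Nat) (x : α)
    (hnd : l.Nodup) (h : l.filter p = l.take k) (hx : l[k]? = some x) :
    l.filter (fun n => p n || n == x) = l.take (k + 1) := by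
  induction l generalizing k with
  | nil => simp at hx
  | cons a tl ih =>
    by_cases hpa : p a
    · cases k with
      | zero => simp [hpa] at h
      | succ k' =>
        rw [List.filter_cons_of_pos hpa] at h
        simp only [List.take_succ_cons] at h
        simp only [List.getElem?_cons_succ] at hx
        have htl := ih k' (List.Nodup.of_cons hnd) (List.cons.inj h).2 hx
        simp [hpa, htl]
    · rw [List.filter_cons_of_neg (by simpa using hpa)] at h
      cases k with
      | zero =>
        simp only [List.getElem?_cons_zero, Option.some.injEq] at hx
        subst hx
        simp only [List.take_zero] at h
        simp only [List.filter_cons, hpa, Bool.false_or, beq_self_eq_true, List.take_succ_cons,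
          List.take_zero]
        have htlnil : ∀ y ∈ tl, ¬(p y || y == a) = true := by
          intro y hy
          have hpy : ¬ p y := by
            intro hpy
            have hmem : y ∈ tl.filter p := List.mem_filter.mpr ⟨hy, hpy⟩
            simp [h] at hmem
          have hya : y ≠ a := by
            intro e; subst e
            exact (List.nodup_cons.mp hnd).1 hy
          simp [hpy, hya]
        rw [List.filter_eq_nil_iff.mpr htlnil]
        simp
      | succ k' =>
        exfalso
        simp only [List.take_succ_cons] at h
        have ha : a ∈ tl := List.mem_of_mem_filter (h ▸ List.mem_cons_self)
        exact (List.nodup_cons.mp hnd).1 ha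

-- findUnused scans exactly cand coords s
lemma findUnused_eq (coords : List (String × List Int)) (s : Int) (used : PySem.Set String) :
    findUnused coords s used = (cand coords s).find? (fun n => !used.contains n) := by
  unfold findUnused cand
  induction coords with
  | nil => rfl
  | cons p tl ih =>
    simp only [PySem.Set.contains] at ih ⊢
    simp at ih
    by_cases h : ((p.2.length : Int) == s) = true
    · by_cases hc : p.1 ∈ used <;>
        · simp [h, hc]
          try exact ih
    · simp [h]
      try exact ih

-- the loop invariant
def RelInv (coords : List (String × List Int)) (usage : PySem.Dict Int Int) (used : PySem.Set String) : Prop :=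
  ∀ t : Int, 0 ≤ usage.getD t 0 ∧
    (cand coords t).filter (fun n => used.contains n) = (cand coords t).take (usage.getD t 0).toNat

lemma loop_eq (coords : List (String × List Int)) (hnd : (coords.map Prod.fst).Nodup)
    (lenToNames : PySem.Dict Int (List String))
    (hb : ∀ t, (lenToNames.get? t).getD [] = cand coords t) :
    ∀ (shape : List Int) (usage : PySem.Dict Int Int) (used : PySem.Set String) (acc : List String),
      RelInv coords usage used →
      (shape.foldl (inferStepA lenToNames) (usage, acc)).2 =
      (shape.foldl (inferStepB coords) (used, acc)).2 := by
  intro shape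
  induction shape with
  | nil => intro usage used acc _; rfl
  | cons s rest ih =>
    intro usage used acc hrel
    obtain ⟨hnn, hft⟩ := hrel s
    have hcn : (cand coords s).Nodup := cand_nodup coords hnd s
    have hfind : findUnused coords s used =
        (cand coords s)[(usage.getD s 0).toNat]? := by
      rw [findUnused_eq, find?_not_of_filter_take _ _ _ hcn hft]
    simp only [List.foldl_cons]
    by_cases hc : cand coords s = []
    · -- empty bucket: both append the synthetic name, states unchanged
      have hA : inferStepA lenToNames (usage, acc) s =
          (usage, acc ++ ["dim_" ++ PySem.Int.toStr s]) := by
        simp [inferStepA, hb s, hc]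
      have hB : inferStepB coords (used, acc) s =
          (used, acc ++ ["dim_" ++ PySem.Int.toStr s]) := by
        simp [inferStepB, hfind, hc]
      rw [hA, hB]
      exact ih usage used _ hrel
    · by_cases hlt : usage.getD s 0 < ((cand coords s).length : Int)
      · -- the bucket still has an unused name: both take cand[idx]
        have hk : (usage.getD s 0).toNat < (cand coords s).length := by omega
        set x := (cand coords s)[(usage.getD s 0).toNat] with hxdef
        have hsome : (cand coords s)[(usage.getD s 0).toNat]? = some x :=
          List.getElem?_eq_getElem hk
        have hA : inferStepA lenToNames (usage, acc) s =
            (usage.insert s (usage.getD s 0 + 1), acc ++ [x]) := by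
          simp [inferStepA, hb s, hc, hlt, hsome]
        have hB : inferStepB coords (used, acc) s =
            (PySem.Set.add used x, acc ++ [x]) := by
          simp [inferStepB, hfind, hsome]
        rw [hA, hB]
        apply ih
        intro t
        by_cases hts : t = s
        · subst hts
          constructor
          · rw [PySem.Dict.getD_insert]; simp; omega
          · rw [PySem.Dict.getD_insert]
            rw [if_pos rfl]
            have htoNat : (usage.getD t 0 + 1).toNat = (usage.getD t 0).toNat + 1 := by omega
            rw [htoNat]
            have hcongr : (cand coords t).filter (fun n => (PySem.Set.add used x).contains n) =
                (cand coords t).filter (fun n => used.contains n || n == x) := by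
              apply List.filter_congr
              intro y _
              simp [PySem.Set.contains, PySem.Set.mem_add]
              rw [beq_eq_decide]
            rw [hcongr]
            exact filter_or_take_succ _ _ _ x hcn hft hsome
        · obtain ⟨hnn', hft'⟩ := hrel t
          constructor
          · rw [PySem.Dict.getD_insert, if_neg hts]; exact hnn'
          · rw [PySem.Dict.getD_insert, if_neg hts]
            have hcongr : (cand coords t).filter (fun n => (PySem.Set.add used x).contains n) =
                (cand coords t).filter (fun n => used.contains n) := by
              apply List.filter_congr
              intro y hy
              have hyx : y ≠ x := by
                intro e; subst e
                exact hts (cand_disjoint coords hnd (hxdef ▸ List.getElem_mem hk) hy).symm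
              simp [PySem.Set.contains, PySem.Set.mem_add, hyx]
            rw [hcongr]; exact hft'
      · -- bucket exhausted: A bumps the counter, both append the synthetic name
        have hnone : (cand coords s)[(usage.getD s 0).toNat]? = none := by
          apply List.getElem?_eq_none
          omega
        have hA : inferStepA lenToNames (usage, acc) s =
            (usage.insert s (usage.getD s 0 + 1), acc ++ ["dim_" ++ PySem.Int.toStr s]) := by
          simp [inferStepA, hb s, hc, hlt]
        have hB : inferStepB coords (used, acc) s =
            (used, acc ++ ["dim_" ++ PySem.Int.toStr s]) := by
          simp [inferStepB, hfind, hnone]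
        rw [hA, hB]
        apply ih
        intro t
        by_cases hts : t = s
        · subst hts
          constructor
          · rw [PySem.Dict.getD_insert]; simp; omega
          · rw [PySem.Dict.getD_insert]
            rw [if_pos rfl]
            have h1 : (cand coords t).take (usage.getD t 0).toNat = cand coords t :=
              List.take_of_length_le (by omega)
            have h2 : (cand coords t).take (usage.getD t 0 + 1).toNat = cand coords t :=
              List.take_of_length_le (by omega)
            rw [h2, hft, h1]
        · obtain ⟨hnn', hft'⟩ := hrel t
          refine ⟨?_, ?_⟩ <;> rw [PySem.Dict.getD_insert, if_neg hts]
          · exact hnn'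
          · exact hft'

-- ===== VERDICT (by name: the statement is the Claim_ definition above) =====
theorem infer_dims_py_spec : Claim_equal_infer_dims_py := by
  intro shape coords _ hpre
  unfold Spec_infer_dims_py infer_dims_py infer_dims_py_alt
  exact loop_eq coords hpre _ (bucket_eq coords) shape _ _ [] (by
    intro t
    refine ⟨le_refl 0, ?_⟩
    simp [PySem.Dict.getD_empty, PySem.Set.contains, PySem.Set.empty])
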